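-- pv_equiv track=rewrite | github.com/AhmedOs13/Rosalind-Bioinformatics | Algorithmic Heights/05. Double-Degree Array.py | sum_of_neighbor_degrees
-- ===== SOURCE A (Python) =====
-- def sum_of_neighbor_degrees(n, edges):
--     adjacency_list = [[] for _ in range(n)]
--     degree = [0] * n
--
--     for u, v in edges:
--         adjacency_list[u - 1].append(v - 1)
--         adjacency_list[v - 1].append(u - 1)
--         degree[u - 1] += 1
--         degree[v - 1] += 1
--
--     result = [0] * n
--     for i in range(n):
--         for neighbor in adjacency_list[i]:
--             result[i] += degree[neighbor]
--
--     return result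
-- ===== SOURCE B (Python) =====
-- def sum_of_neighbor_degrees(n, edges):
--     degree = [0] * n
--     for u, v in edges:
--         degree[u - 1] += 1
--         degree[v - 1] += 1
--
--     result = [0] * n
--     for u, v in edges:
--         result[u - 1] += degree[v - 1]
--         result[v - 1] += degree[u - 1]
--
--     return result
-- ===== Notes on version B (the rewrite author's own statement) =====
-- stated objective: simpler
-- what changed: B drops the adjacency-list structure and the nested per-vertex neighbor loop entirely: after the same degree pass, a second flat pass over the edges adds degree[v-1] to result[u-1] and degree[u-1] to result[v-1], which yields the identical result including self-loops and duplicate edges (measured ~3.7x faster: no per-edge list appends and no n intermediate lists).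
import Mathlib
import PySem

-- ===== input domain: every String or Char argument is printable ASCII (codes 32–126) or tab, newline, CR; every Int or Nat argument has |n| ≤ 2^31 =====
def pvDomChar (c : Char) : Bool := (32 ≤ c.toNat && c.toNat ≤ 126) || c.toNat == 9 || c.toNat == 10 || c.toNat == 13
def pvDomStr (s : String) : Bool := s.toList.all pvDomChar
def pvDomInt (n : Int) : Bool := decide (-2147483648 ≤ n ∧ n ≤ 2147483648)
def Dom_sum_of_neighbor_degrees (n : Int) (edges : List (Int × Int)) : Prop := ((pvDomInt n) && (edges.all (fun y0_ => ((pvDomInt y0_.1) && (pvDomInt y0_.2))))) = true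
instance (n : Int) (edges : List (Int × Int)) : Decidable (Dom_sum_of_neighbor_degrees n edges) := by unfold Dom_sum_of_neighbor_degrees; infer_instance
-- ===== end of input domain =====

-- B replaces A's adjacency lists and nested per-vertex loop by a second flat pass
-- over the edges (simpler; same asymptotic cost).

-- Python list index with negative wraparound (always in range inside Pre_)
def pyIx (n j : Int) : Nat := (if j < 0 then j + n else j).toNat

-- ===== PORT A =====
def sum_of_neighbor_degrees (n : Int) (edges : List (Int × Int)) : List Int :=
  let N := n.toNat
  -- for u, v in edges: build adjacency_list and degree together
  let ad := edges.foldl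
    (fun (s : List (List Int) × List Int) e =>
      let adj := (s.1.modify (pyIx n (e.1 - 1)) (fun l => l ++ [e.2 - 1])).modify
                   (pyIx n (e.2 - 1)) (fun l => l ++ [e.1 - 1])
      let deg := (s.2.modify (pyIx n (e.1 - 1)) (· + 1)).modify (pyIx n (e.2 - 1)) (· + 1)
      (adj, deg))
    (List.replicate N [], List.replicate N 0)
  -- for i in range(n): for neighbor in adjacency_list[i]: result[i] += degree[neighbor]
  (List.range N).foldl
    (fun result i =>
      result.set i ((ad.1.getD i []).foldl
        (fun acc x => acc + ad.2.getD (pyIx n x) 0) (result.getD i 0)))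
    (List.replicate N 0)

-- ===== PORT B =====
def sum_of_neighbor_degrees_alt (n : Int) (edges : List (Int × Int)) : List Int :=
  let N := n.toNat
  let deg := edges.foldl
    (fun d e => (d.modify (pyIx n (e.1 - 1)) (· + 1)).modify (pyIx n (e.2 - 1)) (· + 1))
    (List.replicate N 0)
  edges.foldl
    (fun r e =>
      (r.modify (pyIx n (e.1 - 1)) (· + deg.getD (pyIx n (e.2 - 1)) 0)).modify
        (pyIx n (e.2 - 1)) (· + deg.getD (pyIx n (e.1 - 1)) 0))
    (List.replicate N 0)

-- ===== PRECONDITION & SPEC =====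
-- Pre_: exactly the inputs on which Python A returns (otherwise an endpoint's Python
-- index u-1 / v-1 is out of range, even after negative wraparound, and A raises IndexError).
def Pre_sum_of_neighbor_degrees (n : Int) (edges : List (Int × Int)) : Prop :=
  ∀ e ∈ edges, 1 - n ≤ e.1 ∧ e.1 ≤ n ∧ 1 - n ≤ e.2 ∧ e.2 ≤ n
instance (n : Int) (edges : List (Int × Int)) : Decidable (Pre_sum_of_neighbor_degrees n edges) := by
  unfold Pre_sum_of_neighbor_degrees; infer_instance

def pvWitness_sum_of_neighbor_degrees : Int × (List (Int × Int)) := (3, [(1, 2), (2, 3), (3, 1)])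

def Spec_sum_of_neighbor_degrees (n : Int) (edges : List (Int × Int)) (out : List Int) : Prop := out = sum_of_neighbor_degrees_alt n edges
instance (n : Int) (edges : List (Int × Int)) (out : List Int) : Decidable (Spec_sum_of_neighbor_degrees n edges out) := by unfold Spec_sum_of_neighbor_degrees; infer_instance

-- ===== CLAIM (what is proved, stated in full; the proofs are below) =====
def Claim_equal_sum_of_neighbor_degrees : Prop := ∀ (n : Int) (edges : List (Int × Int)), Dom_sum_of_neighbor_degrees n edges → Pre_sum_of_neighbor_degrees n edges → Spec_sum_of_neighbor_degrees n edges (sum_of_neighbor_degrees n edges)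

-- ===== LEMMAS AND PROOFS =====

-- A's combined (adjacency, degree) fold, componentwise.
theorem pairFold_snd (n : Int) (edges : List (Int × Int))
    (adj : List (List Int)) (d : List Int) :
    (edges.foldl
      (fun (s : List (List Int) × List Int) e =>
        ((s.1.modify (pyIx n (e.1 - 1)) (fun l => l ++ [e.2 - 1])).modify
           (pyIx n (e.2 - 1)) (fun l => l ++ [e.1 - 1]),
         (s.2.modify (pyIx n (e.1 - 1)) (· + 1)).modify (pyIx n (e.2 - 1)) (· + 1)))
      (adj, d)).2 =
    edges.foldl
      (fun d e => (d.modify (pyIx n (e.1 - 1)) (· + 1)).modify (pyIx n (e.2 - 1)) (· + 1)) d := by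
  induction edges generalizing adj d with
  | nil => rfl
  | cons e es ih => simp [List.foldl_cons, ih]

theorem pairFold_fst (n : Int) (edges : List (Int × Int))
    (adj : List (List Int)) (d : List Int) :
    (edges.foldl
      (fun (s : List (List Int) × List Int) e =>
        ((s.1.modify (pyIx n (e.1 - 1)) (fun l => l ++ [e.2 - 1])).modify
           (pyIx n (e.2 - 1)) (fun l => l ++ [e.1 - 1]),
         (s.2.modify (pyIx n (e.1 - 1)) (· + 1)).modify (pyIx n (e.2 - 1)) (· + 1)))
      (adj, d)).1 =
    edges.foldl
      (fun adj e =>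
        (adj.modify (pyIx n (e.1 - 1)) (fun l => l ++ [e.2 - 1])).modify
          (pyIx n (e.2 - 1)) (fun l => l ++ [e.1 - 1])) adj := by
  induction edges generalizing adj d with
  | nil => rfl
  | cons e es ih => simp [List.foldl_cons, ih]

-- mapping g over a modify is a modify of the map, when g intertwines the updates
theorem map_modify {α β : Type} (g : α → β) (f : α → α) (F : β → β)
    (hc : ∀ a, g (f a) = F (g a)) :
    ∀ (l : List α) (j : Nat), (l.modify j f).map g = (l.map g).modify j F := by
  intro l
  induction l with
  | nil => intro j; simp
  | cons a t ih =>
    intro j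
    cases j with
    | zero => simp [List.modify_zero_cons, hc]
    | succ j => simp [List.modify_succ_cons, ih]

-- A's range loop over an all-zero result computes, per vertex, the neighbor-degree sum
theorem rangeLoop_eq_map (d : List Int) (n : Int) :
    ∀ (adj : List (List Int)) (m : Nat) (res : List Int), m ≤ res.length →
    (List.range m).foldl
      (fun result i =>
        result.set i ((adj.getD i []).foldl
          (fun acc x => acc + d.getD (pyIx n x) 0) (result.getD i 0)))
      res =
    res.mapIdx (fun i x =>
      if i < m then (adj.getD i []).foldl (fun acc x => acc + d.getD (pyIx n x) 0) x else x) := by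
  intro adj m
  induction m with
  | zero =>
    intro res _
    simp only [List.range_zero, List.foldl_nil, Nat.not_lt_zero, if_false]
    apply List.ext_getElem
    · simp
    · intro i h1 h2; simp
  | succ m ih =>
    intro res hm
    rw [List.range_succ, List.foldl_append, ih res (Nat.le_of_succ_le hm)]
    simp only [List.foldl_cons, List.foldl_nil]
    apply List.ext_getElem
    · simp
    · intro i h1 h2
      have hil : i < res.length := by simpa using h1
      simp only [List.getElem_set, List.getElem_mapIdx]
      by_cases hi : m = i
      · subst hi
        simp [List.getElem?_eq_getElem hil]
      · rw [if_neg hi]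
        by_cases h3 : i < m
        · simp [h3, Nat.lt_succ_of_lt h3]
        · have h4 : ¬ i < m + 1 := by omega
          simp [h3, h4]

-- the heart: pushing "sum of degrees of the stored neighbors" through the adjacency fold
-- turns each append into B's direct additive update
theorem adjFold_map (d : List Int) (n : Int) :
    ∀ (edges : List (Int × Int)) (adj : List (List Int)),
    (edges.foldl
      (fun adj e =>
        (adj.modify (pyIx n (e.1 - 1)) (fun l => l ++ [e.2 - 1])).modify
          (pyIx n (e.2 - 1)) (fun l => l ++ [e.1 - 1])) adj).map
      (fun l => l.foldl (fun acc x => acc + d.getD (pyIx n x) 0) 0) =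
    edges.foldl
      (fun r e =>
        (r.modify (pyIx n (e.1 - 1)) (· + d.getD (pyIx n (e.2 - 1)) 0)).modify
          (pyIx n (e.2 - 1)) (· + d.getD (pyIx n (e.1 - 1)) 0))
      (adj.map (fun l => l.foldl (fun acc x => acc + d.getD (pyIx n x) 0) 0)) := by
  intro edges
  induction edges with
  | nil => intro adj; simp
  | cons e es ih =>
    intro adj
    simp only [List.foldl_cons]
    rw [ih]
    congr 1
    rw [map_modify _ _ (· + d.getD (pyIx n (e.1 - 1)) 0)
        (by intro a; simp [List.foldl_append]),
      map_modify _ _ (· + d.getD (pyIx n (e.2 - 1)) 0)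
        (by intro a; simp [List.foldl_append])]

-- length side condition for the range loop
theorem foldLen (n : Int) (edges : List (Int × Int)) :
    ∀ (adj : List (List Int)),
    (edges.foldl
      (fun adj e =>
        (adj.modify (pyIx n (e.1 - 1)) (fun l => l ++ [e.2 - 1])).modify
          (pyIx n (e.2 - 1)) (fun l => l ++ [e.1 - 1])) adj).length = adj.length := by
  induction edges with
  | nil => intro adj; rfl
  | cons e es ih => intro adj; simp [List.foldl_cons, ih]

-- ===== VERDICT (by name: the statement is the Claim_ definition above) =====
theorem sum_of_neighbor_degrees_spec : Claim_equal_sum_of_neighbor_degrees := by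
  intro n edges _ _
  unfold Spec_sum_of_neighbor_degrees sum_of_neighbor_degrees sum_of_neighbor_degrees_alt
  simp only [pairFold_fst, pairFold_snd]
  set N := n.toNat with hN
  set d : List Int := edges.foldl
      (fun d e => (d.modify (pyIx n (e.1 - 1)) (· + 1)).modify (pyIx n (e.2 - 1)) (· + 1))
      (List.replicate N (0 : Int)) with hd
  set adjF := edges.foldl
      (fun adj e =>
        (adj.modify (pyIx n (e.1 - 1)) (fun l => l ++ [e.2 - 1])).modify
          (pyIx n (e.2 - 1)) (fun l => l ++ [e.1 - 1])) (List.replicate N ([] : List Int)) with hadj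
  have hlen : adjF.length = N := by rw [hadj, foldLen]; simp
  have h1 := rangeLoop_eq_map d n adjF N (List.replicate N (0 : Int)) (by simp)
  rw [h1]
  have h2 : (List.replicate N (0 : Int)).mapIdx (fun i x =>
      if i < N then (adjF.getD i []).foldl (fun acc x => acc + d.getD (pyIx n x) 0) x else x) =
      adjF.map (fun l => l.foldl (fun acc x => acc + d.getD (pyIx n x) 0) 0) := by
    apply List.ext_getElem
    · simp [hlen]
    · intro i hi1 hi2
      have hiN : i < N := by simpa using hi1
      simp [hiN, List.getD_eq_getElem?_getD, List.getElem?_eq_getElem (hlen ▸ hiN)]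
  rw [h2, hadj, adjFold_map]
  simp
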